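-- pv_equiv track=rewrite | github.com/rudrajit1729/CodeBucket | CP_Platform_Bucket/CodeChef/Lunchtime/August/games.py | solve
-- ===== SOURCE A (Python) =====
-- def solve(A, n):
-- 	if A.count(1) == n:
-- 		return "No"
-- 	cnt = 0
-- 	ind = []
-- 	i = 0
-- 	while (i < n):
-- 		if A[i] == 0:
-- 			cnt = 1
-- 			j = i+1
-- 			while (j < n and A[j] != 1):
-- 				cnt += 1
-- 				j+=1
-- 				if j == n:
-- 					break
-- 			if cnt % 2 == 0:
-- 				return "No"
-- 			else:
-- 				ind.append(cnt)
-- 				cnt = 0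
-- 				i = j+1
-- 		else:
-- 			i += 1
-- 	x = len(ind)
-- 	flag = 0
-- 	for i in range(x):
-- 		if ind[i] != 1:
-- 			flag = 1
-- 	if flag == 0 and x!=1:
-- 		return "No"
-- 	else:
-- 		return "Yes"
-- ===== SOURCE B (Python) =====
-- def zero_runs(xs):
--     # recursive index-search decomposition: jump straight to the first 0,
--     # measure the run as the distance to the next 1, recurse on the remainder
--     if 0 not in xs:
--         return []
--     rest = xs[xs.index(0):]
--     if 1 not in rest:
--         return [len(rest)]
--     j = rest.index(1)
--     return [j] + zero_runs(rest[j + 1:])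
--
--
-- def solve(A, n):
--     if A.count(1) == n:
--         return "No"
--     runs = zero_runs(A[:max(n, 0)])  # first n elements; none if n <= 0
--     if any(r % 2 == 0 for r in runs):
--         return "No"
--     if all(r == 1 for r in runs) and len(runs) != 1:
--         return "No"
--     return "Yes"
-- ===== Notes on version B (the rewrite author's own statement) =====
-- stated objective: alternative
-- what changed: Replaces A's elementwise counter scan (nested index while-loops with interleaved early returns and a final flag loop) by a recursive divide-and-conquer over the prefix A[:max(n,0)]: each zero-run is located by jumping with list.index to the first 0 and measuring its length as the distance to the next 1 (index arithmetic, no per-element counting), recursing on the slice after the run; the verdict is then read off the run list by post-hoc any/all checks.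
-- outside the precondition, e.g. on solve([0, 0, 1, 1], 6): A returns 'No', B returns 'No'; on solve([0, 0], 3): A raises IndexError, B returns 'No'
import Mathlib
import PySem

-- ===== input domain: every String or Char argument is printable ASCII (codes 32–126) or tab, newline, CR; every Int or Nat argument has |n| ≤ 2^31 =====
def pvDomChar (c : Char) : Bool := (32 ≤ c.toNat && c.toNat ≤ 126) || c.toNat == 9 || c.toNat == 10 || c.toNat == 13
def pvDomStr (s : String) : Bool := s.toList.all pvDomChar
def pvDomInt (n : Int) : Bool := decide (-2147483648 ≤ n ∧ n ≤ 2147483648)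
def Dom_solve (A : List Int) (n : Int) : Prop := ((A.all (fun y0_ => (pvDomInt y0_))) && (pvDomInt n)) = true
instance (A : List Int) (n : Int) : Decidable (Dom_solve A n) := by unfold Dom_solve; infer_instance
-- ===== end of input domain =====

-- B keeps A's one-line all-ones fast path but replaces the nested counter while-loops,
-- interleaved early returns and final flag loop by a recursive index-search over A[:n]
-- (list.index to the first 0, run length = distance to the next 1, recurse on the rest)
-- followed by post-hoc any/all checks on the collected run lengths.

-- ===== PORT A =====

-- inner while loop: while (j < n and A[j] != 1): cnt += 1; j += 1; (break at j == n)
-- returns none where Python raises IndexError; fuel is only a totality guard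
-- (any fuel > (n - j).toNat reproduces the loop exactly)
def solveInner (A : List Int) (n : Int) (j : Int) (cnt : Int) : Nat → Option (Int × Int)
  | 0 => none
  | fuel + 1 =>
    if j < n then
      match PySem.List.pyGet? A j with
      | none => none
      | some a =>
        if a ≠ 1 then solveInner A n (j + 1) (cnt + 1) fuel
        else some (cnt, j)
    else some (cnt, j)

-- final flag loop: flag over ind, then the flag == 0 and x != 1 test
def solveFinish (ind : List Int) : String :=
  let flag : Int := ind.foldl (fun f c => if c ≠ 1 then 1 else f) 0
  if flag = 0 ∧ ind.length ≠ 1 then "No" else "Yes"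

-- outer while loop over i, accumulating ind (fuel is only a totality guard)
def solveOuter (A : List Int) (n : Int) (i : Int) (ind : List Int) : Nat → String
  | 0 => ""
  | fuel + 1 =>
    if i < n then
      match PySem.List.pyGet? A i with
      | none => ""  -- IndexError in Python
      | some a =>
        if a = 0 then
          match solveInner A n (i + 1) 1 fuel with
          | none => ""  -- IndexError in Python
          | some (cnt, j) =>
            if PySem.Int.mod cnt 2 = 0 then "No"
            else solveOuter A n (j + 1) (ind ++ [cnt]) fuel
        else solveOuter A n (i + 1) ind fuel
    else solveFinish ind

def solve (A : List Int) (n : Int) : String :=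
  if (PySem.List.count A 1 : Int) = n then "No"
  else solveOuter A n 0 [] (n.toNat + 1)

-- ===== PORT B =====

-- zero_runs from Source B: '0 not in xs' / 'xs.index(0)' are the two arms of index? xs 0
-- (membership and first index coincide); '1 not in rest' / 'rest.index(1)' likewise;
-- slices xs[i:] / rest[j+1:] are PySem.List.slice; fuel is only a totality guard
-- (any fuel > xs.length reproduces the recursion exactly)
def zeroRunsF : Nat → List Int → List Int
  | 0, _ => []
  | fuel + 1, xs =>
    match PySem.List.index? xs 0 with
    | none => []
    | some i =>
      let rest := PySem.List.slice xs (some (i : Int)) none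
      match PySem.List.index? rest 1 with
      | none => [(rest.length : Int)]
      | some j => (j : Int) :: zeroRunsF fuel (PySem.List.slice rest (some ((j : Int) + 1)) none)

def zeroRuns (xs : List Int) : List Int := zeroRunsF (xs.length + 1) xs

def solve_alt (A : List Int) (n : Int) : String :=
  if (PySem.List.count A 1 : Int) = n then "No"
  else
    let runs := zeroRuns (PySem.List.slice A none (some (max n 0)))  -- A[:max(n, 0)]
    if runs.any (fun r => PySem.Int.mod r 2 == 0) then "No"
    else if runs.all (fun r => r == 1) && runs.length ≠ 1 then "No"
    else "Yes"

-- ===== PRECONDITION & SPEC =====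
-- Pre_ excludes only n > len(A): there the Python A raises IndexError except when an
-- even zero-run aborts the scan first (and then both programs return "No"); every input
-- A accepts otherwise (n ≤ len(A), negative n included) is inside the claim.
def Pre_solve (A : List Int) (n : Int) : Prop := n ≤ (A.length : Int)
instance (A : List Int) (n : Int) : Decidable (Pre_solve A n) := by unfold Pre_solve; infer_instance

def pvWitness_solve : List Int × Int := ([0, 0, 0], 3)

def Spec_solve (A : List Int) (n : Int) (out : String) : Prop := out = solve_alt A n
instance (A : List Int) (n : Int) (out : String) : Decidable (Spec_solve A n out) := by unfold Spec_solve; infer_instance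

-- ===== CLAIM (what is proved, stated in full; the proofs are below) =====
def Claim_equal_solve : Prop := ∀ (A : List Int) (n : Int), Dom_solve A n → Pre_solve A n → Spec_solve A n (solve A n)

-- ===== LEMMAS AND PROOFS =====

-- the common characterisation: the list of zero-run lengths of the scanned prefix
-- (a run starts at a 0 and extends over every following non-1 element); state-passing
-- structural recursion (second argument = length of the run currently open, if any)
def runsGo : List Int → Option Int → List Int
  | [], none => []
  | [], some c => [c]
  | a :: t, none => if a = 0 then runsGo t (some 1) else runsGo t none
  | a :: t, some c => if a = 1 then c :: runsGo t none else runsGo t (some (c + 1))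

def runsSpec (l : List Int) : List Int := runsGo l none

theorem runsIn_spec (t : List Int) : ∀ c : Int,
    runsGo t (some c) =
      (c + ((t.takeWhile (fun x => x != 1)).length : Int)) ::
        runsGo ((t.drop (t.takeWhile (fun x => x != 1)).length).drop 1) none := by
  induction t with
  | nil => intro c; simp [runsGo]
  | cons a t ih =>
      intro c
      by_cases ha : a = 1
      · simp [runsGo, ha]
      · rw [show runsGo (a :: t) (some c) = runsGo t (some (c + 1)) by simp [runsGo, ha],
          ih (c + 1), List.takeWhile_cons]
        simp only [ha, bne_iff_ne, ne_eq, not_false_eq_true, if_pos, List.length_cons,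
          List.drop_succ_cons]
        push_cast
        ring_nf

theorem runsSpec_cons_zero (t : List Int) :
    runsSpec (0 :: t) =
      (1 + ((t.takeWhile (fun x => x != 1)).length : Int)) ::
        runsSpec ((t.drop (t.takeWhile (fun x => x != 1)).length).drop 1) := by
  unfold runsSpec
  rw [show runsGo ((0 : Int) :: t) none = runsGo t (some 1) by simp [runsGo], runsIn_spec]

theorem runsSpec_cons_of_ne (a : Int) (t : List Int) (ha : a ≠ 0) :
    runsSpec (a :: t) = runsSpec t := by
  simp [runsSpec, runsGo, ha]

-- first index of 1 = length of the non-1 prefix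
theorem tw_of_index (t : List Int) : ∀ j, PySem.List.index? t 1 = some j →
    (t.takeWhile (fun x => x != 1)).length = j := by
  induction t with
  | nil => intro j h; simp [PySem.List.index?_eq_idxOf?] at h
  | cons a t ih =>
      intro j h
      by_cases ha : a = 1
      · subst ha
        rw [PySem.List.index?_cons_self] at h
        simp at h
        simp [h.symm]
      · rw [PySem.List.index?_cons_of_ne t ha] at h
        match hj : PySem.List.index? t 1 with
        | none => rw [hj] at h; simp at h
        | some j' =>
            rw [hj] at h
            simp at h
            rw [List.takeWhile_cons]
            simp [ha, ih j' hj, ← h]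

theorem tw_of_none (t : List Int) (h : PySem.List.index? t 1 = none) :
    t.takeWhile (fun x => x != 1) = t := by
  rw [PySem.List.index?_eq_none_iff] at h
  apply List.takeWhile_eq_self_iff.mpr
  intro x hx
  simp
  exact fun e => h (e ▸ hx)

-- skipping a non-zero head leaves the recursive search unchanged
theorem zeroRunsF_cons_ne (fuel : Nat) (a : Int) (t : List Int) (ha : a ≠ 0) :
    zeroRunsF (fuel + 1) (a :: t) = zeroRunsF (fuel + 1) t := by
  rw [zeroRunsF, zeroRunsF, PySem.List.index?_cons_of_ne t ha]
  match hi : PySem.List.index? t 0 with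
  | none => simp
  | some i =>
      simp only [Option.map_some]
      have h1 : PySem.List.slice (a :: t) (some ((i + 1 : Nat) : Int)) none = t.drop i := by
        rw [PySem.List.slice_from_natCast]
        simp
      have h2 : PySem.List.slice t (some ((i : Nat) : Int)) none = t.drop i := by
        rw [PySem.List.slice_from_natCast]
      rw [h1, h2]

-- the recursive index-search computes the zero-run lengths
theorem zeroRunsF_eq (N : Nat) : ∀ (xs : List Int), xs.length ≤ N →
    ∀ fuel, xs.length < fuel → zeroRunsF fuel xs = runsSpec xs := by
  induction N with
  | zero =>
      intro xs hN fuel hf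
      have : xs = [] := List.eq_nil_of_length_eq_zero (by omega)
      subst this
      match fuel, hf with
      | fuel + 1, _ => rw [zeroRunsF]; simp [PySem.List.index?_eq_idxOf?, runsSpec, runsGo]
  | succ N ih =>
      intro xs hN fuel hf
      match fuel, hf with
      | fuel + 1, hf =>
      match xs with
      | [] => rw [zeroRunsF]; simp [PySem.List.index?_eq_idxOf?, runsSpec, runsGo]
      | a :: t =>
        by_cases ha : a = 0
        · subst ha
          rw [zeroRunsF, PySem.List.index?_cons_self]
          have hrest : PySem.List.slice ((0 : Int) :: t) (some (0 : Int)) none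
              = (0 : Int) :: t := by
            simp [PySem.List.slice_from_natCast ((0 : Int) :: t) 0]
          simp only [Nat.cast_zero]
          rw [hrest]
          rw [PySem.List.index?_cons_of_ne t (by norm_num : (0 : Int) ≠ 1)]
          match hj : PySem.List.index? t 1 with
          | none =>
              simp only [Option.map_none]
              rw [runsSpec_cons_zero, tw_of_none t hj]
              simp [runsSpec, runsGo]
              push_cast
              ring
          | some j =>
              simp only [Option.map_some]
              have htw : (t.takeWhile (fun x => x != 1)).length = j := tw_of_index t j hj
              have hrem : PySem.List.slice ((0 : Int) :: t) (some (((j + 1 : Nat) : Int) + 1)) none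
                  = t.drop (j + 1) := by
                rw [show (((j + 1 : Nat) : Int) + 1) = ((j + 2 : Nat) : Int) by push_cast; ring,
                  PySem.List.slice_from_natCast]
                simp
              rw [hrem]
              have hlen : (t.drop (j + 1)).length ≤ N := by
                simp only [List.length_cons] at hN
                simp only [List.length_drop]
                omega
              rw [ih (t.drop (j + 1)) hlen fuel (by
                simp only [List.length_cons] at hf
                simp only [List.length_drop]
                omega)]
              rw [runsSpec_cons_zero, htw]
              rw [show (t.drop j).drop 1 = t.drop (j + 1) by rw [List.drop_drop]]
              push_cast
              ring_nf
        · rw [zeroRunsF_cons_ne fuel a t ha, runsSpec_cons_of_ne a t ha]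
          exact ih t (by simp only [List.length_cons] at hN; omega) (fuel + 1)
            (by simp only [List.length_cons] at hf; omega)

theorem zeroRuns_eq (xs : List Int) : zeroRuns xs = runsSpec xs :=
  zeroRunsF_eq xs.length xs le_rfl (xs.length + 1) (by omega)

-- A's early-return scan over the runs, with the already-banked runs in ind
def gRuns : List Int → List Int → String
  | ind, [] => solveFinish ind
  | ind, c :: rs => if PySem.Int.mod c 2 = 0 then "No" else gRuns (ind ++ [c]) rs

theorem inner_eq (A : List Int) (n j cnt : Int) (fuel : Nat) (h0 : 0 ≤ j)
    (hn : n ≤ (A.length : Int)) (hf : (n - j).toNat < fuel) :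
    solveInner A n j cnt fuel =
      some (cnt + ((((A.take n.toNat).drop j.toNat).takeWhile (fun x => x != 1)).length : Int),
            j + ((((A.take n.toNat).drop j.toNat).takeWhile (fun x => x != 1)).length : Int)) := by
  induction fuel generalizing j cnt with
  | zero => omega
  | succ fuel ih =>
      by_cases hlt : j < n
      · have hjA : j.toNat < A.length := by omega
        have hjL : j.toNat < (A.take n.toNat).length := by
          simp only [List.length_take]
          omega
        have hg : PySem.List.pyGet? A j = some (A[j.toNat]) :=
          PySem.List.pyGet?_eq_some_getElem A h0 (by omega)
        have hLj : (A.take n.toNat)[j.toNat] = A[j.toNat] := List.getElem_take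
        have hdrop : (A.take n.toNat).drop j.toNat =
            A[j.toNat] :: (A.take n.toNat).drop (j.toNat + 1) := by
          rw [List.drop_eq_getElem_cons hjL, hLj]
        rw [solveInner]
        simp only [hlt, if_pos, hg]
        by_cases ha : A[j.toNat] = 1
        · simp [ha, hdrop]
        · have ihj := ih (j + 1) (cnt + 1) (by omega) (by omega)
          have hj1 : (j + 1).toNat = j.toNat + 1 := by omega
          rw [if_pos ha, ihj, hj1]
          rw [hdrop]
          simp only [List.takeWhile_cons]
          simp [ha]
          constructor <;> ring
      · have : (A.take n.toNat).drop j.toNat = [] := by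
          apply List.drop_eq_nil_of_le
          simp only [List.length_take]
          omega
        rw [solveInner]
        simp [hlt, this]

theorem outer_eq (A : List Int) (n i : Int) (ind : List Int) (fuel : Nat) (h0 : 0 ≤ i)
    (hn : n ≤ (A.length : Int)) (hf : (n - i).toNat < fuel) :
    solveOuter A n i ind fuel = gRuns ind (runsSpec ((A.take n.toNat).drop i.toNat)) := by
  induction fuel generalizing i ind with
  | zero => omega
  | succ fuel ih =>
      by_cases hlt : i < n
      · have hiA : i.toNat < A.length := by omega
        have hiL : i.toNat < (A.take n.toNat).length := by
          simp only [List.length_take]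
          omega
        have hg : PySem.List.pyGet? A i = some (A[i.toNat]) :=
          PySem.List.pyGet?_eq_some_getElem A h0 (by omega)
        have hLi : (A.take n.toNat)[i.toNat] = A[i.toNat] := List.getElem_take
        have hdrop : (A.take n.toNat).drop i.toNat =
            A[i.toNat] :: (A.take n.toNat).drop (i.toNat + 1) := by
          rw [List.drop_eq_getElem_cons hiL, hLi]
        rw [solveOuter]
        simp only [hlt, if_pos, hg]
        by_cases ha : A[i.toNat] = 0
        · have hinner := inner_eq A n (i + 1) 1 fuel (by omega) hn (by omega)
          have hi1 : (i + 1).toNat = i.toNat + 1 := by omega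
          rw [hi1] at hinner
          set t := (A.take n.toNat).drop (i.toNat + 1) with ht
          set e := (t.takeWhile (fun x => x != 1)).length with he
          have hrs : runsSpec ((A.take n.toNat).drop i.toNat) =
              (1 + (e : Int)) :: runsSpec ((t.drop e).drop 1) := by
            rw [hdrop, ha, runsSpec_cons_zero, ← he]
          have hdd : (A.take n.toNat).drop (i + 1 + (e : Int) + 1).toNat = (t.drop e).drop 1 := by
            rw [ht, List.drop_drop, List.drop_drop]
            congr 1
            omega
          rw [if_pos ha, hrs, gRuns]
          split
          next heq =>
              exact absurd (hinner.symm.trans heq) (by simp)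
          next cnt j heq =>
              rw [hinner] at heq
              simp only [Option.some.injEq, Prod.mk.injEq] at heq
              obtain ⟨hc, hj⟩ := heq
              subst hc
              subst hj
              by_cases hmod : PySem.Int.mod (1 + (e : Int)) 2 = 0
              · rw [if_pos hmod, if_pos hmod]
              · rw [if_neg hmod, if_neg hmod]
                rw [ih (i + 1 + (e : Int) + 1) (ind ++ [1 + (e : Int)]) (by omega) (by omega),
                  hdd]
        · have hrec := ih (i + 1) ind (by omega) (by omega)
          have hi1 : (i + 1).toNat = i.toNat + 1 := by omega
          rw [if_neg ha, hrec, hi1]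
          have hrs : runsSpec ((A.take n.toNat).drop i.toNat) =
              runsSpec ((A.take n.toNat).drop (i.toNat + 1)) := by
            rw [hdrop, runsSpec_cons_of_ne _ _ ha]
          rw [hrs]
      · have hnil : (A.take n.toNat).drop i.toNat = [] := by
          apply List.drop_eq_nil_of_le
          simp only [List.length_take]
          omega
        rw [solveOuter]
        simp [hlt, hnil, runsSpec, runsGo, gRuns]

-- the early-return scan equals the post-hoc any/finish evaluation
theorem gRuns_eq (rs ind : List Int) :
    gRuns ind rs =
      if rs.any (fun r => PySem.Int.mod r 2 == 0) then "No"
      else solveFinish (ind ++ rs) := by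
  induction rs generalizing ind with
  | nil => simp [gRuns]
  | cons c rs ih =>
      rw [gRuns, ih]
      by_cases h2 : (2:Int) ∣ c
      · simp [h2]
      · simp [h2]

-- the flag loop computes "not all equal to 1"
theorem flag_eq (ind : List Int) (f0 : Int) :
    ind.foldl (fun f c => if c ≠ 1 then 1 else f) f0 =
      if ind.all (fun c => c == 1) then f0 else 1 := by
  induction ind generalizing f0 with
  | nil => simp
  | cons c t ih =>
      rw [List.foldl_cons]
      by_cases hc : c = 1
      · rw [if_neg (show ¬(c ≠ 1) by simp [hc]), ih]
        simp [hc]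
      · rw [if_pos hc, ih]
        simp [hc]

theorem finish_eq (rs : List Int) :
    solveFinish rs =
      if rs.all (fun r => r == 1) && rs.length ≠ 1 then "No" else "Yes" := by
  unfold solveFinish
  rw [flag_eq]
  by_cases hall : rs.all (fun c => c == 1)
  · simp [hall]
  · simp [hall]

theorem solve_alt_eq (A : List Int) (n : Int)
    (hcnt : (PySem.List.count A 1 : Int) ≠ n) :
    solve_alt A n =
      if (runsSpec (A.take n.toNat)).any (fun r => PySem.Int.mod r 2 == 0) then "No"
      else if (runsSpec (A.take n.toNat)).all (fun r => r == 1) &&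
          (runsSpec (A.take n.toNat)).length ≠ 1 then "No"
      else "Yes" := by
  unfold solve_alt
  rw [if_neg hcnt, PySem.List.slice_to A (le_max_right n 0), zeroRuns_eq,
    show (max n 0).toNat = n.toNat by omega]

-- ===== VERDICT (by name: the statement is the Claim_ definition above) =====
theorem solve_spec : Claim_equal_solve := by
  intro A n _hdom hpre
  have hnl : n ≤ (A.length : Int) := hpre
  unfold Spec_solve solve
  by_cases hcnt : (PySem.List.count A 1 : Int) = n
  · -- the all-ones fast path: both programs answer "No" at once
    unfold solve_alt
    rw [if_pos hcnt, if_pos hcnt]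
  · rw [if_neg hcnt, solve_alt_eq A n hcnt]
    rw [outer_eq A n 0 [] (n.toNat + 1) (by omega) hnl (by omega)]
    simp only [Int.toNat_zero, List.drop_zero]
    rw [gRuns_eq, finish_eq]
    simp
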